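-- pv_equiv track=rewrite | github.com/ZhengWeiLim/cultural-keywords-osf | src/word_association.py | get_response_sum_with_cues
-- ===== SOURCE A (Python) =====
-- def get_response_sum_with_cues(cue_r_fq, cues=None, initial_r_fq=None):
--     r_fq = {}
--     for cue, rfq in cue_r_fq.items():
--         if (cues is None) or (cue in cues):
--             for r, fq in rfq.items():
--                 r_fq[r] = r_fq.get(r, 0) + fq
--         else:
--             for r, fq in rfq.items():
--                 r_fq[r] = r_fq.get(r, 0) + 0
--     if initial_r_fq is not None:
--         r_fq = {r: r_fq[r] if r in r_fq else 0 for r, _ in initial_r_fq.items()}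
--     return r_fq
-- ===== SOURCE B (Python) =====
-- def get_response_sum_with_cues(cue_r_fq, cues=None, initial_r_fq=None):
--     # Transposed, group-then-sum: fix the result key set first, collect the
--     # frequencies of the selected cues grouped by response, then build the
--     # result in one comprehension summing each group.
--     if initial_r_fq is not None:
--         keys = list(initial_r_fq)
--     else:
--         keys = list(dict.fromkeys(r for rfq in cue_r_fq.values() for r in rfq))
--     selected_items = [(r, fq)
--                       for cue, rfq in cue_r_fq.items()
--                       if cues is None or cue in cues
--                       for r, fq in rfq.items()]
--     by_key = {}
--     for r, fq in selected_items:
--         by_key.setdefault(r, []).append(fq)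
--     return {r: sum(by_key.get(r, ())) for r in keys}
-- ===== Notes on version B (the rewrite author's own statement) =====
-- stated objective: alternative
-- what changed: B transposes the computation: it fixes the result key set up front (initial_r_fq's keys, else the first-occurrence union of all response keys), collects the selected cues' frequencies grouped by response in one pass, and builds the result as a single comprehension summing each group, instead of A's forward running-accumulator pass with +0 insertions for excluded cues and a final dict rebuild; Pre_ only excludes association lists whose initial_r_fq carries duplicate keys, which never arise from a Python dict argument.
import Mathlib
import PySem

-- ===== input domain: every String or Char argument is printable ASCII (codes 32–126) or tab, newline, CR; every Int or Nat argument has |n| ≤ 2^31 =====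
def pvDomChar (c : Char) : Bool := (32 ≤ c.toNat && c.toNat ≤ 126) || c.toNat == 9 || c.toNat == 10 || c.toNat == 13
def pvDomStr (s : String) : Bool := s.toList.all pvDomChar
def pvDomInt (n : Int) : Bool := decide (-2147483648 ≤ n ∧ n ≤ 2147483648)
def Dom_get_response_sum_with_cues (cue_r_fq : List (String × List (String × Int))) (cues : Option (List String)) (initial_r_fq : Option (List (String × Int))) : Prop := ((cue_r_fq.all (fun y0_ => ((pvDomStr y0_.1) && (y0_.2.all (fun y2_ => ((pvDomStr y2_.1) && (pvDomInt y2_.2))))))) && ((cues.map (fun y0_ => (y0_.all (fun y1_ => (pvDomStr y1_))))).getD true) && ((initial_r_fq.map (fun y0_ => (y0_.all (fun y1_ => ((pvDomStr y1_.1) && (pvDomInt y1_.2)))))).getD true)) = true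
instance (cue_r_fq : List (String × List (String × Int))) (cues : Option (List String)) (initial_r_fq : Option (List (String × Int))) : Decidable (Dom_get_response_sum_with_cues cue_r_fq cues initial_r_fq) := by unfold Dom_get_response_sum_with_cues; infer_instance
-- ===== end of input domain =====

-- B transposes the computation: it fixes the result key set first, groups the selected cues'
-- frequencies by response in one pass, then builds the result by summing each group — instead of
-- A's single forward accumulator pass; same results, no speed claim.

-- ===== PORT A =====
def get_response_sum_with_cues (cue_r_fq : List (String × List (String × Int))) (cues : Option (List String)) (initial_r_fq : Option (List (String × Int))) : List (String × Int) :=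
  let r_fq : PySem.Dict String Int :=
    cue_r_fq.foldl (fun d p =>
      if (match cues with | none => true | some cs => cs.contains p.1) then
        p.2.foldl (fun d q => d.insert q.1 (d.getD q.1 0 + q.2)) d
      else
        p.2.foldl (fun d q => d.insert q.1 (d.getD q.1 0 + 0)) d)
      PySem.Dict.empty
  match initial_r_fq with
  | none => r_fq.items
  | some init =>
      -- final dict comprehension over initial_r_fq.items()
      (init.foldl (fun d p =>
        d.insert p.1 (if r_fq.contains p.1 then r_fq.getD p.1 0 else 0)) PySem.Dict.empty).items

-- ===== PORT B =====
def get_response_sum_with_cues_alt (cue_r_fq : List (String × List (String × Int))) (cues : Option (List String)) (initial_r_fq : Option (List (String × Int))) : List (String × Int) :=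
  let keys : List String :=
    match initial_r_fq with
    | some init => init.map Prod.fst
    | none => PySem.List.dedup (cue_r_fq.flatMap (fun p => p.2.map Prod.fst))
  let selected_items : List (String × Int) :=
    (cue_r_fq.filter (fun p => match cues with | none => true | some cs => cs.contains p.1)).flatMap (fun p => p.2)
  -- by_key.setdefault(r, []).append(fq)  =  modify r [] (· ++ [fq])
  let by_key : PySem.Dict String (List Int) :=
    selected_items.foldl (fun d q => d.modify q.1 [] (· ++ [q.2])) PySem.Dict.empty
  -- dict comprehension over `keys` (distinct under Pre_), rendered as a map
  keys.map (fun r => (r, (by_key.getD r []).sum))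

-- ===== PRECONDITION & SPEC =====
-- Pre_ excludes association lists carrying a duplicate key inside initial_r_fq: such a list does not
-- represent any Python dict argument (dict keys are unique), so no input the Python A accepts is excluded.
def Pre_get_response_sum_with_cues (cue_r_fq : List (String × List (String × Int))) (cues : Option (List String)) (initial_r_fq : Option (List (String × Int))) : Prop :=
  ((initial_r_fq.getD []).map Prod.fst).Nodup
instance (cue_r_fq : List (String × List (String × Int))) (cues : Option (List String)) (initial_r_fq : Option (List (String × Int))) : Decidable (Pre_get_response_sum_with_cues cue_r_fq cues initial_r_fq) := by unfold Pre_get_response_sum_with_cues; infer_instance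

def pvWitness_get_response_sum_with_cues : (List (String × List (String × Int))) × Option (List String) × (Option (List (String × Int))) :=
  ([("cat", [("dog", 2), ("mouse", 1)]), ("sun", [("dog", 3)])], some ["cat"], some [("dog", 5), ("moon", 1)])

def Spec_get_response_sum_with_cues (cue_r_fq : List (String × List (String × Int))) (cues : Option (List String)) (initial_r_fq : Option (List (String × Int))) (out : List (String × Int)) : Prop := out = get_response_sum_with_cues_alt cue_r_fq cues initial_r_fq
instance (cue_r_fq : List (String × List (String × Int))) (cues : Option (List String)) (initial_r_fq : Option (List (String × Int))) (out : List (String × Int)) : Decidable (Spec_get_response_sum_with_cues cue_r_fq cues initial_r_fq out) := by unfold Spec_get_response_sum_with_cues; infer_instance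

-- ===== CLAIM (what is proved, stated in full; the proofs are below) =====
def Claim_equal_get_response_sum_with_cues : Prop := ∀ (cue_r_fq : List (String × List (String × Int))) (cues : Option (List String)) (initial_r_fq : Option (List (String × Int))), Dom_get_response_sum_with_cues cue_r_fq cues initial_r_fq → Pre_get_response_sum_with_cues cue_r_fq cues initial_r_fq → Spec_get_response_sum_with_cues cue_r_fq cues initial_r_fq (get_response_sum_with_cues cue_r_fq cues initial_r_fq)

-- ===== LEMMAS AND PROOFS =====

-- the inner response loop of A, with weight w applied to each entry
theorem grs_inner_getD (l : List (String × Int)) (d : PySem.Dict String Int) (r : String)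
    (w : (String × Int) → Int) :
    (l.foldl (fun d q => d.insert q.1 (d.getD q.1 0 + w q)) d).getD r 0
      = d.getD r 0 + ((l.filter (fun q => q.1 == r)).map w).sum := by
  induction l generalizing d with
  | nil => simp
  | cons q l ih =>
    simp only [List.foldl_cons, List.filter_cons, ih]
    by_cases h : q.1 = r
    · simp [h]
      ring
    · simp [h, PySem.Dict.getD_insert, Ne.symm h]

def grsSel (cues : Option (List String)) (c : String) : Bool :=
  match cues with | none => true | some cs => cs.contains c

-- A's outer loop body, abstracted
def grsStep (cues : Option (List String)) (d : PySem.Dict String Int)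
    (p : String × List (String × Int)) : PySem.Dict String Int :=
  if grsSel cues p.1 then
    p.2.foldl (fun d q => d.insert q.1 (d.getD q.1 0 + q.2)) d
  else
    p.2.foldl (fun d q => d.insert q.1 (d.getD q.1 0 + 0)) d

-- A's accumulator holds, at each key, the sum of that key's frequencies across the selected cues
theorem grs_outer_getD (L : List (String × List (String × Int))) (cues : Option (List String))
    (d : PySem.Dict String Int) (r : String) :
    (L.foldl (grsStep cues) d).getD r 0
      = d.getD r 0
        + ((((L.filter (fun p => grsSel cues p.1)).flatMap (fun p => p.2)).filter
              (fun q => q.1 == r)).map (fun q => q.2)).sum := by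
  induction L generalizing d with
  | nil => simp
  | cons p L ih =>
    simp only [List.foldl_cons, List.filter_cons, ih]
    by_cases hs : grsSel cues p.1 = true
    · unfold grsStep
      rw [if_pos hs, grs_inner_getD, hs]
      simp [List.filter_append, List.map_append, List.sum_append]
      ring
    · unfold grsStep
      rw [if_neg hs, grs_inner_getD]
      simp only [Bool.not_eq_true] at hs
      simp [hs]

theorem grs_inner_keys (l : List (String × Int)) (d : PySem.Dict String Int)
    (w : (String × Int) → Int) :
    (l.foldl (fun d q => d.insert q.1 (d.getD q.1 0 + w q)) d).keys
      = PySem.Set.update d.keys (l.map Prod.fst) :=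
  PySem.Dict.keys_foldl_insert_key l Prod.fst (fun d q => d.getD q.1 0 + w q) d

theorem grs_outer_keys (L : List (String × List (String × Int))) (cues : Option (List String))
    (d : PySem.Dict String Int) :
    (L.foldl (grsStep cues) d).keys
      = PySem.Set.update d.keys (L.flatMap (fun p => p.2.map Prod.fst)) := by
  induction L generalizing d with
  | nil => simp [PySem.Set.update]
  | cons p L ih =>
    have hstep : (grsStep cues d p).keys = PySem.Set.update d.keys (p.2.map Prod.fst) := by
      unfold grsStep
      by_cases hs : grsSel cues p.1 = true
      · rw [if_pos hs]; exact grs_inner_keys _ _ _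
      · rw [if_neg hs]; exact grs_inner_keys _ _ _
    simp only [List.foldl_cons, ih, hstep, List.flatMap_cons]
    simp [PySem.Set.update, List.foldl_append]

theorem grs_outer_nodup (L : List (String × List (String × Int))) (cues : Option (List String))
    (d : PySem.Dict String Int) (h : d.keys.Nodup) :
    (L.foldl (grsStep cues) d).keys.Nodup := by
  induction L generalizing d with
  | nil => exact h
  | cons p L ih =>
    refine ih _ ?_
    unfold grsStep
    by_cases hs : grsSel cues p.1 = true
    · rw [if_pos hs]; exact PySem.Dict.nodup_keys_foldl_insert_key _ _ _ _ h
    · rw [if_neg hs]; exact PySem.Dict.nodup_keys_foldl_insert_key _ _ _ _ h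

-- a response occurring in no cue's dict has an empty group, hence column sum 0
theorem grs_sum_zero (L : List (String × List (String × Int))) (cues : Option (List String))
    (r : String) (h : r ∉ L.flatMap (fun p => p.2.map Prod.fst)) :
    ((((L.filter (fun p => grsSel cues p.1)).flatMap (fun p => p.2)).filter
        (fun q => q.1 == r)).map (fun q => q.2)).sum = 0 := by
  have hnil : ((L.filter (fun p => grsSel cues p.1)).flatMap (fun p => p.2)).filter
      (fun q => q.1 == r) = [] := by
    rw [List.filter_eq_nil_iff]
    intro q hq
    simp only [List.mem_flatMap] at hq
    obtain ⟨p, hp, hqp⟩ := hq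
    simp only [beq_iff_eq]
    intro hr
    exact h (List.mem_flatMap.mpr ⟨p, List.mem_of_mem_filter hp, hr ▸ List.mem_map_of_mem hqp⟩)
  rw [hnil]
  rfl

-- ===== VERDICT (by name: the statement is the Claim_ definition above) =====
theorem get_response_sum_with_cues_spec : Claim_equal_get_response_sum_with_cues := by
  intro cue_r_fq cues initial_r_fq _ hinit
  unfold Pre_get_response_sum_with_cues at hinit
  unfold Spec_get_response_sum_with_cues get_response_sum_with_cues get_response_sum_with_cues_alt
  have hfold : cue_r_fq.foldl (fun d p =>
      if (match cues with | none => true | some cs => cs.contains p.1) then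
        p.2.foldl (fun d q => d.insert q.1 (d.getD q.1 0 + q.2)) d
      else
        p.2.foldl (fun d q => d.insert q.1 (d.getD q.1 0 + 0)) d) PySem.Dict.empty
      = cue_r_fq.foldl (grsStep cues) PySem.Dict.empty := rfl
  simp only [hfold]
  set r_fq := cue_r_fq.foldl (grsStep cues) PySem.Dict.empty with hr_fq
  have hkeys : r_fq.keys = PySem.Set.ofList (cue_r_fq.flatMap (fun p => p.2.map Prod.fst)) := by
    rw [hr_fq, grs_outer_keys]
    simp [PySem.Set.update, PySem.Set.ofList_eq_foldl, PySem.Dict.keys_empty]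
  have hnodup : r_fq.keys.Nodup := grs_outer_nodup _ _ _ PySem.Dict.nodup_keys_empty
  have hval : ∀ r, r_fq.getD r 0
      = ((((cue_r_fq.filter (fun p => grsSel cues p.1)).flatMap (fun p => p.2)).filter
            (fun q => q.1 == r)).map (fun q => q.2)).sum := by
    intro r
    rw [hr_fq, grs_outer_getD]
    simp
  have hBval : ∀ r, ((((cue_r_fq.filter (fun p => match cues with | none => true | some cs => cs.contains p.1)).flatMap (fun p => p.2)).foldl (fun d q => d.modify q.1 [] (· ++ [q.2])) PySem.Dict.empty).getD r []).sum
      = ((((cue_r_fq.filter (fun p => grsSel cues p.1)).flatMap (fun p => p.2)).filter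
            (fun q => q.1 == r)).map (fun q => q.2)).sum := by
    intro r
    rw [PySem.Dict.getD_foldl_modify_append]
    simp only [PySem.Dict.getD_empty, List.nil_append]
    rfl
  cases initial_r_fq with
  | none =>
    dsimp only
    rw [PySem.Dict.items_eq_map_keys r_fq hnodup 0, hkeys]
    simp only [PySem.List.dedup_eq_ofList]
    apply List.map_congr_left
    intro r _
    rw [hval r, hBval r]
  | some init =>
    dsimp only
    simp only [Option.getD_some] at hinit
    rw [PySem.Dict.items_foldl_insert_fresh (d := PySem.Dict.empty) (k := Prod.fst)
      (v := fun p => if r_fq.contains p.1 then r_fq.getD p.1 0 else 0) (l := init)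
      (fun a _ => PySem.Dict.contains_empty _) hinit]
    rw [List.map_map]
    apply List.map_congr_left
    intro p _
    simp only [Function.comp]
    congr 1
    rw [hBval p.1]
    by_cases hc : r_fq.contains p.1 = true
    · rw [if_pos hc, hval p.1]
    · rw [if_neg hc]
      have hm : p.1 ∉ r_fq.keys := fun hm => (by simp [(PySem.Dict.contains_iff_mem_keys _ _).mpr hm] at hc)
      rw [hkeys] at hm
      have hnm : p.1 ∉ cue_r_fq.flatMap (fun p => p.2.map Prod.fst) := by
        intro h; exact hm (by simpa [PySem.Set.mem_ofList] using h)
      exact (grs_sum_zero cue_r_fq cues p.1 hnm).symm
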